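-- pv_equiv track=rewrite | github.com/wenchiyang/pacman_gym | pacman_gym/envs/goal_finding.py | generate_layout_text
-- ===== SOURCE A (Python) =====
-- def generate_layout_text(width, height, pacman_position, ghost_positions, food_positions, wall_positions):
--     layout = []
--     for r in range(height):
--         row = ''
--         for c in range(width):
--             if (r,c) in wall_positions:
--                 row += '%'
--             elif (r,c) == pacman_position:
--                 row += 'P'
--             elif (r, c) in ghost_positions:
--                 row += 'G'
--             elif (r, c) in food_positions:
--                 row += '.'
--             else:
--                 row += ' '
--         layout.append(row)
--     return '\n'.join(layout)
-- ===== SOURCE B (Python) =====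
-- def generate_layout_text(width, height, pacman_position, ghost_positions, food_positions, wall_positions):
--     # Scatter approach: start from a blank canvas and paint each entity onto it
--     # in increasing priority order (food, ghosts, pacman, walls), ignoring
--     # positions that fall outside the grid; A instead gathers per cell.
--     grid = [[' '] * width for _ in range(height)]
--
--     def paint(pos, ch):
--         r, c = pos
--         if 0 <= r < height and 0 <= c < width:
--             grid[r][c] = ch
--
--     for p in food_positions:
--         paint(p, '.')
--     for p in ghost_positions:
--         paint(p, 'G')
--     paint(pacman_position, 'P')
--     for p in wall_positions:
--         paint(p, '%')
--     return '\n'.join(''.join(row) for row in grid)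
-- ===== Notes on version B (the rewrite author's own statement) =====
-- stated objective: faster
-- what changed: Inverts the traversal: instead of A's per-cell gather (scan every entity list for each of the h*w cells), B scatters — it allocates a blank h*w character canvas and paints each entity position onto it once in increasing priority order (food, ghosts, pacman, walls), skipping out-of-grid positions, then joins the canvas.
import Mathlib
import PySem

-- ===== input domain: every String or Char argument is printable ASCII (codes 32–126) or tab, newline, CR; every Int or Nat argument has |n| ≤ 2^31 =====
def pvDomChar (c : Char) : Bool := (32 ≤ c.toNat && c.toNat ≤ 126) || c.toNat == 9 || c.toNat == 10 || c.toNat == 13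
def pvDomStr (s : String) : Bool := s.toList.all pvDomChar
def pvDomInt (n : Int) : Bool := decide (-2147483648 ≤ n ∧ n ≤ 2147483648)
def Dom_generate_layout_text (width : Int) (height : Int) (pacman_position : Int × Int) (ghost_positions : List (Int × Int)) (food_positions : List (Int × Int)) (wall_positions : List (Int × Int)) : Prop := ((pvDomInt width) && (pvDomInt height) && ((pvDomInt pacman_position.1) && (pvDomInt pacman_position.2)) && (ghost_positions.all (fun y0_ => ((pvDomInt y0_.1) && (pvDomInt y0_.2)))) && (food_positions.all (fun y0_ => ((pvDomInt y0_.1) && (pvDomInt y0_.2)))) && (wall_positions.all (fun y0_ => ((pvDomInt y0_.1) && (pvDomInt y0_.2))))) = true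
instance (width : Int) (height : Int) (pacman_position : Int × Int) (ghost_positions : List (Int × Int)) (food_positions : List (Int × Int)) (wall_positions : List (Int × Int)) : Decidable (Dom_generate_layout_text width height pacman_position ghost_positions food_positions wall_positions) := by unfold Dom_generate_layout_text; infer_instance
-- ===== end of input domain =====

-- B inverts A's traversal: instead of scanning every entity list for each cell (gather),
-- it paints each entity once onto a blank canvas in increasing priority order (scatter).

-- ===== PORT A =====
-- literal transliteration of A: nested loops, chained membership tests, string +=
def generate_layout_text (width : Int) (height : Int) (pacman_position : Int × Int) (ghost_positions : List (Int × Int)) (food_positions : List (Int × Int)) (wall_positions : List (Int × Int)) : String :=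
  let layout : List String := (PySem.List.pyRange 0 height 1).foldl (fun layout r =>
    let row : String := (PySem.List.pyRange 0 width 1).foldl (fun row c =>
      if (r, c) ∈ wall_positions then row ++ "%"
      else if (r, c) = pacman_position then row ++ "P"
      else if (r, c) ∈ ghost_positions then row ++ "G"
      else if (r, c) ∈ food_positions then row ++ "."
      else row ++ " ") ""
    layout ++ [row]) []
  PySem.Str.join "\n" layout

-- ===== PORT B =====
-- Source B's paint(pos, ch): set grid[r][c] := ch if (r,c) lies inside the canvas, else leave the grid alone
def pvPaint (height : Int) (width : Int) (grid : List (List Char)) (pos : Int × Int) (ch : Char) : List (List Char) :=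
  if 0 ≤ pos.1 ∧ pos.1 < height ∧ 0 ≤ pos.2 ∧ pos.2 < width then
    grid.set pos.1.toNat ((grid.getD pos.1.toNat []).set pos.2.toNat ch)
  else grid

-- literal transliteration of B: blank canvas, then one paint per entity (food, ghosts, pacman, walls), then join
def generate_layout_text_alt (width : Int) (height : Int) (pacman_position : Int × Int) (ghost_positions : List (Int × Int)) (food_positions : List (Int × Int)) (wall_positions : List (Int × Int)) : String :=
  let grid0 : List (List Char) := (PySem.List.pyRange 0 height 1).map (fun _ => List.replicate width.toNat ' ')
  let g1 := food_positions.foldl (fun g p => pvPaint height width g p '.') grid0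
  let g2 := ghost_positions.foldl (fun g p => pvPaint height width g p 'G') g1
  let g3 := pvPaint height width g2 pacman_position 'P'
  let g4 := wall_positions.foldl (fun g p => pvPaint height width g p '%') g3
  PySem.Str.join "\n" (g4.map (fun row => String.ofList row))

-- ===== PRECONDITION & SPEC =====
def Spec_generate_layout_text (width : Int) (height : Int) (pacman_position : Int × Int) (ghost_positions : List (Int × Int)) (food_positions : List (Int × Int)) (wall_positions : List (Int × Int)) (out : String) : Prop := out = generate_layout_text_alt width height pacman_position ghost_positions food_positions wall_positions
instance (width : Int) (height : Int) (pacman_position : Int × Int) (ghost_positions : List (Int × Int)) (food_positions : List (Int × Int)) (wall_positions : List (Int × Int)) (out : String) : Decidable (Spec_generate_layout_text width height pacman_position ghost_positions food_positions wall_positions out) := by unfold Spec_generate_layout_text; infer_instance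

-- ===== CLAIM =====
def Claim_equal_generate_layout_text : Prop := ∀ (width : Int) (height : Int) (pacman_position : Int × Int) (ghost_positions : List (Int × Int)) (food_positions : List (Int × Int)) (wall_positions : List (Int × Int)), Dom_generate_layout_text width height pacman_position ghost_positions food_positions wall_positions → Spec_generate_layout_text width height pacman_position ghost_positions food_positions wall_positions (generate_layout_text width height pacman_position ghost_positions food_positions wall_positions)

-- ===== LEMMAS AND PROOFS =====

-- the glyph A's per-cell chain of membership tests produces (proof-only abbreviation)
def pvGlyph (pacman_position : Int × Int) (ghost_positions food_positions wall_positions : List (Int × Int)) (r c : Int) : Char :=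
  if (r, c) ∈ wall_positions then '%'
  else if (r, c) = pacman_position then 'P'
  else if (r, c) ∈ ghost_positions then 'G'
  else if (r, c) ∈ food_positions then '.'
  else ' '

-- canvas shape: height.toNat rows, each of width.toNat cells
def pvShape (height width : Int) (g : List (List Char)) : Prop :=
  g.length = height.toNat ∧ ∀ i < g.length, (g.getD i []).length = width.toNat

theorem pvShape_paint {height width : Int} {g : List (List Char)} (hs : pvShape height width g)
    (p : Int × Int) (v : Char) : pvShape height width (pvPaint height width g p v) := by
  obtain ⟨h1, h2⟩ := hs
  unfold pvPaint
  split
  · refine ⟨by simpa using h1, ?_⟩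
    intro i hi
    rw [List.length_set] at hi
    rw [List.getD_eq_getElem?_getD, List.getElem?_set]
    split
    · next heq =>
      split
      · next hlt => simpa [← heq, List.getD_eq_getElem?_getD] using h2 i (heq ▸ hlt)
      · next hlt => exact absurd (heq ▸ hi) hlt
    · exact (List.getD_eq_getElem?_getD ..).symm ▸ h2 i hi
  · exact ⟨h1, h2⟩

-- reading cell (r,c) after one paint: the painted value exactly at p = (r,c), unchanged elsewhere
theorem pvPaint_read {height width : Int} {g : List (List Char)} (hs : pvShape height width g)
    (p : Int × Int) (v : Char) (r c : Nat) (hr : r < height.toNat) (hc : c < width.toNat) :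
    (((pvPaint height width g p v).getD r []).getD c ' ') =
      if p = ((r : Int), (c : Int)) then v else ((g.getD r []).getD c ' ') := by
  obtain ⟨h1, h2⟩ := hs
  have hrg : r < g.length := h1 ▸ hr
  have hrow : (g.getD r []).length = width.toNat := h2 r hrg
  unfold pvPaint
  split
  · next hin =>
    rw [List.getD_eq_getElem?_getD (l := List.set ..), List.getElem?_set]
    by_cases hpr : p.1.toNat = r
    · have hp1 : p.1 = (r : Int) := by omega
      by_cases hpc : p.2.toNat = c
      · have hp2 : p.2 = (c : Int) := by omega
        have hp : p = ((r : Int), (c : Int)) := Prod.ext_iff.mpr ⟨hp1, hp2⟩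
        rw [List.getD_eq_getElem g [] hrg] at hrow
        simp [hp, hrg, hrow, hc]
      · have hne : p ≠ ((r : Int), (c : Int)) := by
          intro h; apply hpc; rw [h]; simp
        simp [hne, hpr, hpc, hrg, List.getD_eq_getElem?_getD]
    · have hne : p ≠ ((r : Int), (c : Int)) := by
        intro h; apply hpr; rw [h]; simp
      simp [hne, hpr, List.getD_eq_getElem?_getD]
  · next hout =>
    have hne : p ≠ ((r : Int), (c : Int)) := by
      intro h; subst h; simp at hout; omega
    rw [if_neg hne]

-- shape is preserved by a whole painting pass
theorem pvShape_foldl {height width : Int} {g : List (List Char)} (hs : pvShape height width g)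
    (l : List (Int × Int)) (v : Char) :
    pvShape height width (l.foldl (fun g p => pvPaint height width g p v) g) := by
  induction l generalizing g with
  | nil => exact hs
  | cons x xs ih => exact ih (pvShape_paint hs x v)

-- reading a cell after a painting pass with one glyph: the glyph iff the cell is in the list
theorem pvPaint_foldl_read {height width : Int} {g : List (List Char)} (hs : pvShape height width g)
    (l : List (Int × Int)) (v : Char) (r c : Nat) (hr : r < height.toNat) (hc : c < width.toNat) :
    (((l.foldl (fun g p => pvPaint height width g p v) g).getD r []).getD c ' ') =
      if ((r : Int), (c : Int)) ∈ l then v else ((g.getD r []).getD c ' ') := by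
  induction l generalizing g with
  | nil => simp
  | cons x xs ih =>
    rw [List.foldl_cons, ih (pvShape_paint hs x v), pvPaint_read hs x v r c hr hc]
    by_cases h1 : ((r : Int), (c : Int)) ∈ xs <;> by_cases h2 : x = ((r : Int), (c : Int)) <;>
      simp [h1, h2, eq_comm]

-- the blank canvas has the right shape
theorem pvShape_grid0 (height width : Int) :
    pvShape height width ((PySem.List.pyRange 0 height 1).map (fun _ => List.replicate width.toNat ' ')) := by
  constructor
  · simp [PySem.List.length_pyRange_one]
  · intro i hi
    rw [List.length_map] at hi
    rw [List.getD_eq_getElem?_getD, List.getElem?_map, List.getElem?_eq_getElem hi]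
    simp

-- A's inner loop (string += one-char string per iteration), at the character level
theorem pvFoldl_str_append_toList {α : Type} (l : List α) (f : α → String) (init : String) :
    (l.foldl (fun acc x => acc ++ f x) init).toList = init.toList ++ (l.map f).flatMap String.toList := by
  induction l generalizing init with
  | nil => simp
  | cons x xs ih => simp [List.foldl_cons, ih]

-- A's row string is exactly the glyph row
theorem pvRowA_eq (width : Int) (pac : Int × Int) (ghosts foods walls : List (Int × Int)) (r : Int) :
    ((PySem.List.pyRange 0 width 1).foldl (fun row c =>
      if (r, c) ∈ walls then row ++ "%"
      else if (r, c) = pac then row ++ "P"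
      else if (r, c) ∈ ghosts then row ++ "G"
      else if (r, c) ∈ foods then row ++ "."
      else row ++ " ") "").toList =
    (PySem.List.pyRange 0 width 1).map (pvGlyph pac ghosts foods walls r) := by
  have hfun : (fun (row : String) (c : Int) =>
      if (r, c) ∈ walls then row ++ "%"
      else if (r, c) = pac then row ++ "P"
      else if (r, c) ∈ ghosts then row ++ "G"
      else if (r, c) ∈ foods then row ++ "." else row ++ " ") =
      (fun (row : String) (c : Int) => row ++
        (if (r, c) ∈ walls then "%"
         else if (r, c) = pac then "P"
         else if (r, c) ∈ ghosts then "G"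
         else if (r, c) ∈ foods then "." else " ")) := by
    funext row c; split_ifs <;> rfl
  rw [hfun, pvFoldl_str_append_toList]
  have hone : (fun (c : Int) =>
      (if (r, c) ∈ walls then "%"
       else if (r, c) = pac then "P"
       else if (r, c) ∈ ghosts then "G"
       else if (r, c) ∈ foods then "." else " ").toList) =
      (fun (c : Int) => [pvGlyph pac ghosts foods walls r c]) := by
    funext c; unfold pvGlyph; split_ifs <;> rfl
  simp only [List.flatMap_map, hone, String.toList_empty, List.nil_append]
  induction (PySem.List.pyRange 0 width 1) with
  | nil => rfl
  | cons x xs ih => simp [List.flatMap_cons, ih]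

-- ===== VERDICT (by name: the statement is the Claim_ definition above) =====
theorem generate_layout_text_spec : Claim_equal_generate_layout_text := by
  intro width height pac ghosts foods walls _
  unfold Spec_generate_layout_text generate_layout_text generate_layout_text_alt
  simp only []
  rw [PySem.List.foldl_append_singleton_eq_map, List.nil_append]
  -- the painted canvas, characterised cell by cell
  set grid0 : List (List Char) := (PySem.List.pyRange 0 height 1).map (fun _ => List.replicate width.toNat ' ') with hg0
  set g4 : List (List Char) :=
    walls.foldl (fun g p => pvPaint height width g p '%')
      (pvPaint height width
        (ghosts.foldl (fun g p => pvPaint height width g p 'G')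
          (foods.foldl (fun g p => pvPaint height width g p '.') grid0)) pac 'P') with hg4
  have hs0 : pvShape height width grid0 := pvShape_grid0 height width
  have hs1 := pvShape_foldl hs0 foods '.'
  have hs2 := pvShape_foldl hs1 ghosts 'G'
  have hs3 := pvShape_paint hs2 pac 'P'
  have hs4 : pvShape height width g4 := pvShape_foldl hs3 walls '%'
  have hcell : ∀ (r c : Nat), r < height.toNat → c < width.toNat →
      ((g4.getD r []).getD c ' ') = pvGlyph pac ghosts foods walls (r : Int) (c : Int) := by
    intro r c hr hc
    rw [hg4, pvPaint_foldl_read hs3 walls '%' r c hr hc,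
      pvPaint_read hs2 pac 'P' r c hr hc,
      pvPaint_foldl_read hs1 ghosts 'G' r c hr hc,
      pvPaint_foldl_read hs0 foods '.' r c hr hc]
    have hblank : ((grid0.getD r []).getD c ' ') = ' ' := by
      rw [hg0, List.getD_eq_getElem?_getD (l := List.map ..), List.getElem?_map]
      have hrl : r < (PySem.List.pyRange 0 height 1).length := by
        rw [PySem.List.length_pyRange_one]; omega
      rw [List.getElem?_eq_getElem hrl]
      simp [List.getD_eq_getElem?_getD, hc]
    rw [hblank]
    unfold pvGlyph
    simp only [eq_comm]
  -- the canvas IS the glyph grid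
  have hgrid : g4 = (PySem.List.pyRange 0 height 1).map (fun r =>
      (PySem.List.pyRange 0 width 1).map (pvGlyph pac ghosts foods walls r)) := by
    apply List.ext_getElem
    · rw [hs4.1, List.length_map, PySem.List.length_pyRange_one]; omega
    · intro i h1 h2
      have hi : i < height.toNat := by rw [hs4.1] at h1; exact h1
      have hrowlen : (g4.getD i []).length = width.toNat := hs4.2 i h1
      have hgd : g4.getD i [] = g4[i] := List.getD_eq_getElem g4 [] h1
      rw [List.getElem_map, PySem.List.getElem_pyRange_one]
      apply List.ext_getElem
      · rw [← hgd, hrowlen, List.length_map, PySem.List.length_pyRange_one]; omega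
      · intro j hj1 hj2
        have hjw : j < width.toNat := by rw [← hgd, hrowlen] at hj1; exact hj1
        rw [List.getElem_map, PySem.List.getElem_pyRange_one]
        have := hcell i j hi hjw
        rw [hgd, List.getD_eq_getElem (g4[i]) ' ' hj1] at this
        simpa using this
  rw [hgrid, List.map_map]
  apply String.toList_inj.mp
  rw [PySem.Str.toList_join, PySem.Str.toList_join, List.map_map, List.map_map]
  congr 1
  apply List.map_congr_left
  intro r _
  simp only [Function.comp_def, String.toList_ofList]
  exact pvRowA_eq width pac ghosts foods walls r
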